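-- pv_equiv track=rewrite | github.com/saxenakrati09/T1_KGFromWiki | ScrapeWikiContent.py | create_concept_sent_dictionary
-- ===== SOURCE A (Python) =====
-- def search_term_in_sent_list(term, sent_list):
--     result_sents = []
--     for i in range(len(sent_list)):
--         if term in sent_list[i]:
--             result_sents.append(sent_list[i])
--     return result_sents
--
-- def create_concept_sent_dictionary(concept_list, list_of_sents):
--     values = []
--     for i in range(len(concept_list)):
--         concept_to_search = concept_list[i]
--         result_sents = search_term_in_sent_list(concept_to_search, list_of_sents)
--         values.append(result_sents)
--     dict_ = dict(zip(concept_list, values))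
--     dict_ = {k: v for k, v in dict_.items() if v!= []}
--     return dict_
-- ===== SOURCE B (Python) =====
-- def create_concept_sent_dictionary(concept_list, list_of_sents):
--     # n-gram dictionary lookup: instead of searching each concept in each
--     # sentence, hash every substring of each sentence whose length occurs among
--     # the concepts and look it up in a set of the concepts; correct because a
--     # concept is contained in a sentence iff it equals some window of the
--     # sentence of the concept's own length.
--     concept_set = set(concept_list)
--     lengths = sorted({len(c) for c in concept_list})
--     buckets = {}
--     for sent in list_of_sents:
--         found = set()
--         for L in lengths:
--             for i in range(len(sent) - L + 1):
--                 g = sent[i:i + L]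
--                 if g in concept_set:
--                     found.add(g)
--         for c in found:
--             buckets.setdefault(c, []).append(sent)
--     return {c: buckets[c] for c in dict.fromkeys(concept_list) if c in buckets}
-- ===== Notes on version B (the rewrite author's own statement) =====
-- stated objective: faster
-- what changed: B replaces A's per-concept substring search over every sentence by n-gram dictionary lookup: it hashes the concepts into a set, enumerates each sentence's substrings of the (few distinct) concept lengths once, and looks each window up in the concept set, so no concept is ever searched for inside a sentence and the per-sentence cost no longer grows with the number of concepts.
import Mathlib
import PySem

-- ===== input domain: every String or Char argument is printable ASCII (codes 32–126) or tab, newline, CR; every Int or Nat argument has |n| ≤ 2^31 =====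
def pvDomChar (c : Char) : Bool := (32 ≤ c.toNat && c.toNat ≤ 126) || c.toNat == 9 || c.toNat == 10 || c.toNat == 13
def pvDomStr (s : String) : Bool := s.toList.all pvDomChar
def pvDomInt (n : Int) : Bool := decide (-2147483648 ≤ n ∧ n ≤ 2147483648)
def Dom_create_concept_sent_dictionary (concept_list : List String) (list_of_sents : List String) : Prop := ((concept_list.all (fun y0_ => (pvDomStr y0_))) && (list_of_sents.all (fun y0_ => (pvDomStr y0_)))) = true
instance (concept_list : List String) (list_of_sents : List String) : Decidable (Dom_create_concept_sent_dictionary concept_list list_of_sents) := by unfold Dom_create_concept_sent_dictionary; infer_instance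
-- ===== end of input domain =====

-- B replaces A's per-concept substring search over the sentences by n-gram dictionary
-- lookup: every sentence window whose length occurs among the concepts is looked up in a
-- hash set of the concepts (objective: alternative algorithm).

-- ===== PORT A =====
def search_term_in_sent_list (term : String) (sent_list : List String) : List String :=
  (PySem.List.pyRange 0 (sent_list.length : Int) 1).foldl
    (fun result_sents i =>
      if PySem.Str.isIn term (PySem.List.pyGetD sent_list i "") then
        result_sents ++ [PySem.List.pyGetD sent_list i ""]
      else result_sents) []

def create_concept_sent_dictionary (concept_list : List String) (list_of_sents : List String) : List (String × List String) :=
  let values : List (List String) :=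
    (PySem.List.pyRange 0 (concept_list.length : Int) 1).foldl
      (fun values i => values ++ [search_term_in_sent_list (PySem.List.pyGetD concept_list i "") list_of_sents]) []
  let dict1 : PySem.Dict String (List String) := PySem.Dict.ofList (concept_list.zip values)
  let dict2 : PySem.Dict String (List String) :=
    dict1.items.foldl (fun d kv => if kv.2 ≠ [] then d.insert kv.1 kv.2 else d) PySem.Dict.empty
  dict2.items

-- ===== PORT B =====
-- inner loop for one window length L: 'for i in range(len(sent) - L + 1): g = sent[i:i+L]; if g in concept_set: found.add(g)'
def pvGramScanL (conceptSet : PySem.Set String) (sent : String)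
    (found : PySem.Set String) (L : Int) : PySem.Set String :=
  (PySem.List.pyRange 0 ((sent.length : Int) - L + 1) 1).foldl
    (fun f i =>
      let g := PySem.Str.slice sent (some i) (some (i + L))
      if PySem.Set.contains conceptSet g then PySem.Set.add f g else f) found

-- 'found = set(); for L in lengths: …'
def pvFound (conceptSet : PySem.Set String) (lengths : List Int) (sent : String) : PySem.Set String :=
  lengths.foldl (pvGramScanL conceptSet sent) PySem.Set.empty

-- 'for c in found: buckets.setdefault(c, []).append(sent)' — the buckets dict is only
-- looked up afterwards, so the set's iteration order cannot affect the result
def pvBucketSent (conceptSet : PySem.Set String) (lengths : List Int)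
    (b : PySem.Dict String (List String)) (sent : String) : PySem.Dict String (List String) :=
  (pvFound conceptSet lengths sent).foldl (fun d c => d.modify c [] (· ++ [sent])) b

-- final dict comprehension over the deduplicated (distinct-key) concepts, emitted as items
def create_concept_sent_dictionary_alt (concept_list : List String) (list_of_sents : List String) : List (String × List String) :=
  let conceptSet : PySem.Set String := PySem.Set.ofList concept_list
  let lengths : List Int :=
    PySem.List.sorted (PySem.Set.ofList (concept_list.map (fun c => (c.length : Int)))) (fun x => x) false
  let buckets : PySem.Dict String (List String) :=
    list_of_sents.foldl (pvBucketSent conceptSet lengths) PySem.Dict.empty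
  (PySem.List.dedup concept_list).foldl
    (fun acc c => if buckets.contains c then acc ++ [(c, buckets.getD c [])] else acc) []

-- ===== PRECONDITION & SPEC =====
def Spec_create_concept_sent_dictionary (concept_list : List String) (list_of_sents : List String) (out : List (String × List String)) : Prop := out = create_concept_sent_dictionary_alt concept_list list_of_sents
instance (concept_list : List String) (list_of_sents : List String) (out : List (String × List String)) : Decidable (Spec_create_concept_sent_dictionary concept_list list_of_sents out) := by unfold Spec_create_concept_sent_dictionary; infer_instance

-- ===== CLAIM (what is proved, stated in full; the proofs are below) =====
def Claim_equal_create_concept_sent_dictionary : Prop := ∀ (concept_list : List String) (list_of_sents : List String), Dom_create_concept_sent_dictionary concept_list list_of_sents → Spec_create_concept_sent_dictionary concept_list list_of_sents (create_concept_sent_dictionary concept_list list_of_sents)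

-- ===== LEMMAS AND PROOFS =====

-- zip-ing a list with a map of itself pairs each element with its image
theorem pv_zip_map_self {α β : Type} (l : List α) (g : α → β) :
    l.zip (l.map g) = l.map (fun c => (c, g c)) := by
  induction l with
  | nil => rfl
  | cons c rest ih => simp [ih]

-- lookup through a fold of inserts of pairs (c, g c): last overwrite wins, value is g x
theorem pv_getD_foldl_insert_pairs (l : List String) (g : String → List String)
    (d : PySem.Dict String (List String)) (x : String) :
    ((l.map (fun c => (c, g c))).foldl (fun acc p => acc.insert p.1 p.2) d).getD x []
      = if x ∈ l then g x else d.getD x [] := by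
  induction l generalizing d with
  | nil => simp
  | cons c rest ih =>
      simp only [List.map_cons, List.foldl_cons, ih, PySem.Dict.getD_insert]
      by_cases hx : x = c
      · subst hx; by_cases hr : x ∈ rest <;> simp [hr]
      · simp [hx, List.mem_cons]

-- the helper scans the whole sentence list: it is List.filter
theorem pv_search_eq (term : String) (sents : List String) :
    search_term_in_sent_list term sents = sents.filter (fun s => PySem.Str.isIn term s) := by
  unfold search_term_in_sent_list
  rw [PySem.List.foldl_pyRange_pyGetD' sents ""
       (fun acc s => if PySem.Str.isIn term s then acc ++ [s] else acc) [] (le_refl 0)]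
  simp only [Int.toNat_zero, List.drop_zero]
  exact PySem.List.foldl_append_if_eq_filter _ _ _

theorem pv_any_eq_decide {α : Type} (p : α → Bool) (l : List α) :
    l.any p = decide (l.filter p ≠ []) := by
  rcases hl : l.any p with _ | _
  · have h0 : l.filter p = [] := List.filter_eq_nil_iff.mpr (by
      intro a ha hpa
      have := List.any_eq_true.mpr ⟨a, ha, hpa⟩
      rw [hl] at this; cases this)
    simp [h0]
  · obtain ⟨a, ha, hpa⟩ := List.any_eq_true.mp hl
    have hm : a ∈ l.filter p := List.mem_filter.mpr ⟨ha, hpa⟩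
    have hne : l.filter p ≠ [] := by intro h0; rw [h0] at hm; cases hm
    simp [hne]

-- the filtering dict comprehension over pairs with fresh distinct keys keeps exactly
-- the pairs with a non-empty value
theorem pv_fold_filter_insert (pairs : List (String × List String))
    (d : PySem.Dict String (List String))
    (hf : ∀ p ∈ pairs, d.contains p.1 = false) (hnd : (pairs.map Prod.fst).Nodup) :
    (pairs.foldl (fun d kv => if kv.2 ≠ [] then d.insert kv.1 kv.2 else d) d).items
      = d.items ++ pairs.filter (fun kv => decide (kv.2 ≠ [])) := by
  induction pairs generalizing d with
  | nil => simp
  | cons kv rest ih =>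
      simp only [List.map_cons, List.nodup_cons] at hnd
      simp only [List.foldl_cons, List.filter_cons]
      by_cases hv : kv.2 ≠ []
      · rw [if_pos hv]
        have hfresh : ∀ p ∈ rest, (d.insert kv.1 kv.2).contains p.1 = false := by
          intro p hp
          rw [PySem.Dict.contains_insert]
          have h1 : (p.1 == kv.1) = false := beq_eq_false_iff_ne.mpr (by
            intro he
            exact hnd.1 (he ▸ List.mem_map_of_mem (f := Prod.fst) hp))
          rw [h1, hf p (List.mem_cons_of_mem _ hp)]
          rfl
        rw [ih _ hfresh hnd.2]
        rw [PySem.Dict.items_insert, hf kv (List.mem_cons_self)]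
        simp [hv]
      · rw [if_neg hv]
        rw [ih _ (fun p hp => hf p (List.mem_cons_of_mem _ hp)) hnd.2]
        simp [hv]

-- A's result, in closed form
theorem pvA_closed (concept_list list_of_sents : List String) :
    create_concept_sent_dictionary concept_list list_of_sents
      = ((PySem.List.dedup concept_list).map
            (fun c => (c, list_of_sents.filter (fun s => PySem.Str.isIn c s)))).filter
          (fun kv => decide (kv.2 ≠ [])) := by
  unfold create_concept_sent_dictionary
  rw [PySem.List.foldl_pyRange_pyGetD' concept_list ""
       (fun acc c => acc ++ [search_term_in_sent_list c list_of_sents]) [] (le_refl 0)]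
  simp only [Int.toNat_zero, List.drop_zero]
  rw [PySem.List.foldl_append_singleton_eq_map, List.nil_append]
  simp only [pv_search_eq]
  rw [pv_zip_map_self]
  have hitems : (PySem.Dict.ofList (concept_list.map
        (fun c => (c, list_of_sents.filter (fun s => PySem.Str.isIn c s))))).items
      = (PySem.List.dedup concept_list).map
          (fun c => (c, list_of_sents.filter (fun s => PySem.Str.isIn c s))) := by
    rw [PySem.Dict.items_eq_map_keys _ (PySem.Dict.nodup_keys_ofList _) []]
    have hkeys : (PySem.Dict.ofList (concept_list.map
          (fun c => (c, list_of_sents.filter (fun s => PySem.Str.isIn c s))))).keys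
        = PySem.List.dedup concept_list := by
      have h1 := PySem.Dict.keys_foldl_insert_key
        (concept_list.map (fun c => (c, list_of_sents.filter (fun s => PySem.Str.isIn c s))))
        Prod.fst (fun _ p => p.2) (PySem.Dict.empty (κ := String) (ν := List String))
      simp only [PySem.Dict.keys_empty, List.map_map] at h1
      have h2 : concept_list.map (Prod.fst ∘ fun c =>
          (c, list_of_sents.filter (fun s => PySem.Str.isIn c s))) = concept_list := by
        rw [show (Prod.fst ∘ fun c =>
          (c, list_of_sents.filter (fun s => PySem.Str.isIn c s))) = id from rfl, List.map_id]
      rw [h2] at h1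
      rw [PySem.List.dedup_eq_ofList]
      exact h1
    rw [hkeys]
    refine List.map_congr_left ?_
    intro k hk
    have h3 := pv_getD_foldl_insert_pairs concept_list
      (fun c => list_of_sents.filter (fun s => PySem.Str.isIn c s)) PySem.Dict.empty k
    simp only [PySem.Dict.getD_empty] at h3
    have h4 : (PySem.Dict.ofList (concept_list.map
        (fun c => (c, list_of_sents.filter (fun s => PySem.Str.isIn c s))))).getD k []
        = if k ∈ concept_list then list_of_sents.filter (fun s => PySem.Str.isIn k s) else [] := h3
    rw [h4]
    simp [(PySem.List.mem_dedup concept_list k).mp hk]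
  rw [hitems]
  rw [pv_fold_filter_insert _ _ (fun p _ => PySem.Dict.contains_empty p.1) ?nodup]
  · rw [show (PySem.Dict.empty : PySem.Dict String (List String)).items = [] from rfl,
        List.nil_append]
  case nodup =>
    rw [List.map_map,
        show (Prod.fst ∘ fun c =>
          (c, list_of_sents.filter (fun s => PySem.Str.isIn c s))) = id from rfl,
        List.map_id]
    exact PySem.List.nodup_dedup _

-- membership in a fold of guarded set-adds
theorem pv_mem_foldl_addif (l : List Int) (g : Int → String) (p : String → Bool)
    (f0 : PySem.Set String) (x : String) :
    x ∈ l.foldl (fun f i => if p (g i) then PySem.Set.add f (g i) else f) f0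
      ↔ x ∈ f0 ∨ (p x = true ∧ ∃ i, i ∈ l ∧ g i = x) := by
  induction l generalizing f0 with
  | nil => simp
  | cons i t ih =>
      simp only [List.foldl_cons]
      rw [ih]
      by_cases hp : p (g i) = true
      · rw [if_pos hp]
        constructor
        · rintro (h | ⟨hp', i', hi', hgi⟩)
          · rcases (PySem.Set.mem_add _ _ _).mp h with h | h
            · exact Or.inl h
            · exact Or.inr ⟨h ▸ hp, i, List.mem_cons_self, h.symm⟩
          · exact Or.inr ⟨hp', i', List.mem_cons_of_mem _ hi', hgi⟩
        · rintro (h | ⟨hp', i', hi', hgi⟩)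
          · exact Or.inl ((PySem.Set.mem_add _ _ _).mpr (Or.inl h))
          · rcases List.mem_cons.mp hi' with h1 | h1
            · exact Or.inl ((PySem.Set.mem_add _ _ _).mpr (Or.inr (h1 ▸ hgi.symm)))
            · exact Or.inr ⟨hp', i', h1, hgi⟩
      · rw [if_neg hp]
        constructor
        · rintro (h | ⟨hp', i', hi', hgi⟩)
          · exact Or.inl h
          · exact Or.inr ⟨hp', i', List.mem_cons_of_mem _ hi', hgi⟩
        · rintro (h | ⟨hp', i', hi', hgi⟩)
          · exact Or.inl h
          · rcases List.mem_cons.mp hi' with h1 | h1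
            · exact absurd (by rw [← hgi, h1] at hp'; exact hp') hp
            · exact Or.inr ⟨hp', i', h1, hgi⟩

-- guarded set-adds preserve distinctness
theorem pv_nodup_foldl_addif (l : List Int) (g : Int → String) (p : String → Bool)
    (f0 : PySem.Set String) (h : f0.Nodup) :
    (l.foldl (fun f i => if p (g i) then PySem.Set.add f (g i) else f) f0).Nodup := by
  induction l generalizing f0 with
  | nil => exact h
  | cons i t ih =>
      simp only [List.foldl_cons]
      by_cases hp : p (g i) = true
      · rw [if_pos hp]; exact ih _ (PySem.Set.nodup_add _ _ h)
      · rw [if_neg hp]; exact ih _ h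

-- the characters of a window slice
theorem pv_slice_toList (s : String) (i L : Int) (h0i : 0 ≤ i) (h0L : 0 ≤ L) :
    (PySem.Str.slice s (some i) (some (i + L))).toList
      = (s.toList.drop i.toNat).take L.toNat := by
  rw [PySem.Str.toList_slice, PySem.Chars.slice_eq_listSlice,
      PySem.List.slice_toNat _ h0i (by omega)]
  congr 1
  omega

-- a window of length L equal to x forces x to have length L and be contained in s
theorem pv_window_len (x s : String) (L i : Int) (h0L : 0 ≤ L) (h0i : 0 ≤ i)
    (hlt : i < (s.length : Int) - L + 1)
    (heq : PySem.Str.slice s (some i) (some (i + L)) = x) :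
    (x.length : Int) = L ∧ PySem.Str.isIn x s = true := by
  have htl : x.toList = (s.toList.drop i.toNat).take L.toNat := by
    rw [← heq, pv_slice_toList s i L h0i h0L]
  have hlen : x.length = L.toNat := by
    have h1 : x.toList.length = ((s.toList.drop i.toNat).take L.toNat).length := by rw [htl]
    simp only [List.length_take, List.length_drop, String.length_toList] at h1
    omega
  refine ⟨by omega, ?_⟩
  rw [PySem.Str.isIn_eq]
  apply (PySem.Chars.exists_prefix_drop_iff_isIn _ _).mp
  exact ⟨i.toNat, htl ▸ List.take_prefix _ _⟩

-- conversely: a concept contained in s occurs as a window of its own length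
theorem pv_isIn_window (x s : String) (h : PySem.Str.isIn x s = true) :
    ∃ i : Int, 0 ≤ i ∧ i < (s.length : Int) - (x.length : Int) + 1 ∧
      PySem.Str.slice s (some i) (some (i + (x.length : Int))) = x := by
  rw [PySem.Str.isIn_eq] at h
  obtain ⟨j, hpre⟩ := (PySem.Chars.exists_prefix_drop_iff_isIn _ _).mpr h
  have hx : x.toList = (s.toList.drop j).take x.toList.length :=
    (List.prefix_iff_eq_take).mp hpre
  have hle : x.toList.length ≤ s.toList.length - j := by
    have := hpre.length_le
    simpa using this
  have hxl : x.toList.length = x.length := String.length_toList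
  have hsl : s.toList.length = s.length := String.length_toList
  by_cases hnil : x.toList = []
  · have hx0 : x.length = 0 := by
      rw [← hxl, hnil]
      rfl
    refine ⟨0, le_refl 0, by omega, ?_⟩
    apply String.toList_inj.mp
    rw [pv_slice_toList s 0 _ (le_refl 0) (Int.natCast_nonneg _)]
    simp [hx0, hnil]
  · have hj : j ≤ s.toList.length := by
      rcases Nat.le_total j s.toList.length with h1 | h1
      · exact h1
      · exfalso
        rw [List.drop_eq_nil_of_le h1] at hx
        simp at hx
        exact hnil (by rw [hx]; rfl)
    refine ⟨(j : Int), Int.natCast_nonneg j, by omega, ?_⟩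
    apply String.toList_inj.mp
    rw [pv_slice_toList s (j : Int) _ (Int.natCast_nonneg j) (Int.natCast_nonneg _)]
    simp only [Int.toNat_natCast]
    rw [hx]
    congr 1

-- one gram scan at length L, as a membership condition
theorem pv_mem_gramScan (cs : PySem.Set String) (sent : String) (f : PySem.Set String)
    (L : Int) (h0L : 0 ≤ L) (x : String) :
    x ∈ pvGramScanL cs sent f L
      ↔ x ∈ f ∨ (PySem.Set.contains cs x = true ∧ (x.length : Int) = L ∧
                  PySem.Str.isIn x sent = true) := by
  unfold pvGramScanL
  rw [pv_mem_foldl_addif _ (fun i => PySem.Str.slice sent (some i) (some (i + L)))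
        (PySem.Set.contains cs) f x]
  constructor
  · rintro (h | ⟨hp, i, hi, hgi⟩)
    · exact Or.inl h
    · obtain ⟨h1, h2⟩ := (PySem.List.mem_pyRange_one).mp hi
      obtain ⟨hlen, hin⟩ := pv_window_len x sent L i h0L h1 h2 hgi
      exact Or.inr ⟨hp, hlen, hin⟩
  · rintro (h | ⟨hp, hlen, hin⟩)
    · exact Or.inl h
    · obtain ⟨i, h1, h2, h3⟩ := pv_isIn_window x sent hin
      exact Or.inr ⟨hp, i, (PySem.List.mem_pyRange_one).mpr ⟨h1, hlen ▸ h2⟩, hlen ▸ h3⟩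

-- the found-set of a sentence: concepts (of a listed length) contained in it
theorem pv_mem_found_aux (cs : PySem.Set String) (sent : String) (lengths : List Int)
    (hL : ∀ L ∈ lengths, 0 ≤ L) (f0 : PySem.Set String) (x : String) :
    x ∈ lengths.foldl (pvGramScanL cs sent) f0
      ↔ x ∈ f0 ∨ (PySem.Set.contains cs x = true ∧ (x.length : Int) ∈ lengths ∧
                   PySem.Str.isIn x sent = true) := by
  induction lengths generalizing f0 with
  | nil => simp
  | cons L t ih =>
      simp only [List.foldl_cons]
      rw [ih (fun L' hL' => hL L' (List.mem_cons_of_mem _ hL')),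
          pv_mem_gramScan cs sent f0 L (hL L List.mem_cons_self) x]
      constructor
      · rintro ((h | ⟨hc, hlen, hin⟩) | ⟨hc, hmem, hin⟩)
        · exact Or.inl h
        · exact Or.inr ⟨hc, List.mem_cons.mpr (Or.inl hlen), hin⟩
        · exact Or.inr ⟨hc, List.mem_cons_of_mem _ hmem, hin⟩
      · rintro (h | ⟨hc, hmem, hin⟩)
        · exact Or.inl (Or.inl h)
        · rcases List.mem_cons.mp hmem with h1 | h1
          · exact Or.inl (Or.inr ⟨hc, h1, hin⟩)
          · exact Or.inr ⟨hc, h1, hin⟩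

theorem pv_mem_found (cs : PySem.Set String) (sent : String) (lengths : List Int)
    (hL : ∀ L ∈ lengths, 0 ≤ L) (x : String) :
    x ∈ pvFound cs lengths sent
      ↔ PySem.Set.contains cs x = true ∧ (x.length : Int) ∈ lengths ∧
          PySem.Str.isIn x sent = true := by
  unfold pvFound
  rw [pv_mem_found_aux cs sent lengths hL PySem.Set.empty x]
  simp [PySem.Set.empty]

theorem pv_nodup_found (cs : PySem.Set String) (sent : String) (lengths : List Int) :
    (pvFound cs lengths sent).Nodup := by
  unfold pvFound
  suffices h : ∀ f0 : PySem.Set String, f0.Nodup →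
      (lengths.foldl (pvGramScanL cs sent) f0).Nodup by
    exact h _ List.nodup_nil
  induction lengths with
  | nil => intro f0 h; exact h
  | cons L t ih =>
      intro f0 h
      simp only [List.foldl_cons]
      exact ih _ (pv_nodup_foldl_addif _ _ _ _ h)

-- appending one sentence into the buckets of a distinct list of concepts: lookup
theorem pv_getD_modify_fold (l : List String) (hnd : l.Nodup)
    (d : PySem.Dict String (List String)) (sent x : String) :
    (l.foldl (fun d c => d.modify c [] (· ++ [sent])) d).getD x []
      = if x ∈ l then d.getD x [] ++ [sent] else d.getD x [] := by
  induction l generalizing d with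
  | nil => simp
  | cons c t ih =>
      simp only [List.nodup_cons] at hnd
      simp only [List.foldl_cons]
      rw [ih hnd.2]
      by_cases hx : x = c
      · subst hx
        simp [hnd.1, PySem.Dict.getD_modify_self]
      · simp [hx, List.mem_cons, PySem.Dict.getD_modify]

-- …and membership
theorem pv_contains_modify_fold (l : List String)
    (d : PySem.Dict String (List String)) (sent x : String) :
    (l.foldl (fun d c => d.modify c [] (· ++ [sent])) d).contains x
      = (d.contains x || decide (x ∈ l)) := by
  induction l generalizing d with
  | nil => simp
  | cons c t ih =>
      simp only [List.foldl_cons]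
      rw [ih, PySem.Dict.contains_modify]
      by_cases hx : x = c <;> simp [hx, List.mem_cons, Bool.or_comm, Bool.or_left_comm]

-- B's bucket dict after all sentences, looked up at a concept x contained per sentence
-- exactly when 'isIn x sent' (the found-set characterisation, supplied as hiff)
theorem pv_build_getD (cs : PySem.Set String) (lengths : List Int) (x : String)
    (hiff : ∀ sent, x ∈ pvFound cs lengths sent ↔ PySem.Str.isIn x sent = true)
    (sents : List String) (d : PySem.Dict String (List String)) :
    (sents.foldl (pvBucketSent cs lengths) d).getD x []
      = d.getD x [] ++ sents.filter (fun s => PySem.Str.isIn x s) := by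
  induction sents generalizing d with
  | nil => simp
  | cons s t ih =>
      simp only [List.foldl_cons, List.filter_cons]
      rw [ih]
      show (pvBucketSent cs lengths d s).getD x [] ++ _ = _
      unfold pvBucketSent
      rw [pv_getD_modify_fold _ (pv_nodup_found cs s lengths) d s x]
      by_cases hin : PySem.Str.isIn x s = true
      · rw [if_pos ((hiff s).mpr hin), hin]
        simp
      · rw [if_neg (fun hmem => hin ((hiff s).mp hmem))]
        simp only [Bool.not_eq_true, PySem.Str.isIn_eq] at hin
        simp [hin]

theorem pv_build_contains (cs : PySem.Set String) (lengths : List Int) (x : String)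
    (hiff : ∀ sent, x ∈ pvFound cs lengths sent ↔ PySem.Str.isIn x sent = true)
    (sents : List String) (d : PySem.Dict String (List String)) :
    (sents.foldl (pvBucketSent cs lengths) d).contains x
      = (d.contains x || sents.any (fun s => PySem.Str.isIn x s)) := by
  induction sents generalizing d with
  | nil => simp
  | cons s t ih =>
      simp only [List.foldl_cons, List.any_cons]
      rw [ih]
      show ((pvBucketSent cs lengths d s).contains x || _) = _
      unfold pvBucketSent
      rw [pv_contains_modify_fold _ d s x]
      have hdec : decide (x ∈ pvFound cs lengths s) = PySem.Str.isIn x s := by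
        by_cases hin : PySem.Str.isIn x s = true
        · have hmem := (hiff s).mpr hin
          rw [PySem.Str.isIn_eq] at hin
          simp [hmem, hin]
        · simp only [Bool.not_eq_true, PySem.Str.isIn_eq] at hin
          have hnm : x ∉ pvFound cs lengths s := by
            intro hmem
            have h2 := (hiff s).mp hmem
            rw [PySem.Str.isIn_eq, hin] at h2
            cases h2
          simp [hnm, hin]
      rw [hdec, Bool.or_assoc]

-- B's result, in the same closed form as A's
theorem pvB_closed (concept_list list_of_sents : List String) :
    create_concept_sent_dictionary_alt concept_list list_of_sents
      = ((PySem.List.dedup concept_list).map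
            (fun c => (c, list_of_sents.filter (fun s => PySem.Str.isIn c s)))).filter
          (fun kv => decide (kv.2 ≠ [])) := by
  unfold create_concept_sent_dictionary_alt
  have hL : ∀ L ∈ PySem.List.sorted
      (PySem.Set.ofList (concept_list.map (fun c => (c.length : Int)))) (fun x => x) false,
      (0 : Int) ≤ L := by
    intro L hmem
    rw [PySem.List.mem_sorted] at hmem
    obtain ⟨c, _, rfl⟩ := List.mem_map.mp ((PySem.Set.mem_ofList _ _).mp hmem)
    positivity
  have hiff : ∀ c ∈ PySem.List.dedup concept_list, ∀ sent,
      c ∈ pvFound (PySem.Set.ofList concept_list)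
            (PySem.List.sorted (PySem.Set.ofList (concept_list.map (fun c => (c.length : Int))))
              (fun x => x) false) sent
        ↔ PySem.Str.isIn c sent = true := by
    intro c hc sent
    have hc' : c ∈ concept_list := (PySem.List.mem_dedup concept_list c).mp hc
    rw [pv_mem_found _ _ _ hL c]
    constructor
    · rintro ⟨_, _, h⟩; exact h
    · intro h
      refine ⟨(PySem.Set.contains_iff _ _).mpr ((PySem.Set.mem_ofList _ _).mpr hc'), ?_, h⟩
      rw [PySem.List.mem_sorted]
      exact (PySem.Set.mem_ofList _ _).mpr (List.mem_map_of_mem hc')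
  rw [PySem.List.foldl_congr_mem _ _
        (fun acc c => if list_of_sents.any (fun s => PySem.Str.isIn c s) then
            acc ++ [(c, list_of_sents.filter (fun s => PySem.Str.isIn c s))] else acc) _ ?hcongr]
  case hcongr =>
    intro acc c hc
    rw [pv_build_contains _ _ c (hiff c hc), pv_build_getD _ _ c (hiff c hc)]
    simp [PySem.Dict.contains_empty, PySem.Dict.getD_empty]
  rw [PySem.List.foldl_append_if (fun c => list_of_sents.any (fun s => PySem.Str.isIn c s))
        (fun c => (c, list_of_sents.filter (fun s => PySem.Str.isIn c s)))]
  rw [List.nil_append, List.filter_map]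
  refine congrArg _ (List.filter_congr ?_)
  intro c _
  show (list_of_sents.any fun s => PySem.Str.isIn c s)
      = decide ((list_of_sents.filter fun s => PySem.Str.isIn c s) ≠ [])
  exact pv_any_eq_decide _ _

-- ===== VERDICT (by name: the statement is the Claim_ definition above) =====
theorem create_concept_sent_dictionary_spec : Claim_equal_create_concept_sent_dictionary := by
  intro concept_list list_of_sents _
  unfold Spec_create_concept_sent_dictionary
  rw [pvA_closed, pvB_closed]
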